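-- pv_equiv track=rewrite | github.com/adrianogil/simplegrammar | src/python/simplegrammar/grammar.py | parse_tags_from
-- ===== SOURCE A (Python) =====
-- def parse_tags_from(text):
--     '''
--         Tags are between ##
--     '''
--     current_tag = ''
--     found_tags = []
--     inside_tag = False
--
--     for s in text:
--         if s == '#':
--             if inside_tag:
--                 found_tags.append(current_tag)
--             current_tag = ''
--             inside_tag = not inside_tag
--         elif inside_tag:
--             if s == '\n' or s == ' ':
--                 inside_tag = False
--                 current_tag = ''
--             else:
--                 current_tag = current_tag + s
--
--     return found_tags
-- ===== SOURCE B (Python) =====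
-- def parse_tags_from(text):
--     '''
--         Tags are between ##
--     '''
--     tags = []
--     inside = False
--     for part in text.split('#')[:-1]:
--         ok = inside and ' ' not in part and '\n' not in part
--         if ok:
--             tags.append(part)
--         inside = not ok
--     return tags
-- ===== Notes on version B (the rewrite author's own statement) =====
-- stated objective: faster
-- what changed: Replaces A's per-character state machine (tag accumulator + inside flag) by splitting the text on the marker character once and folding over the resulting segments, a segment yielding a tag iff the scanner was inside and the segment contains no space or newline.
import Mathlib
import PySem

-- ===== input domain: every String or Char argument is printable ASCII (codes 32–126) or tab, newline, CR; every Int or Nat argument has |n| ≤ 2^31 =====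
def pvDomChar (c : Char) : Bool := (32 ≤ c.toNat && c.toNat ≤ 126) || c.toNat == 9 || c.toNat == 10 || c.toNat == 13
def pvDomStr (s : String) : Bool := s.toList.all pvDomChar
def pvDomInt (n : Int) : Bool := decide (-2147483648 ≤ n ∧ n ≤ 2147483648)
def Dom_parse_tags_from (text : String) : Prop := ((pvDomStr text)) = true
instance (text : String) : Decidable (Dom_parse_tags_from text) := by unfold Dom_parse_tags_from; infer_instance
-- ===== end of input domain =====

-- B replaces A's per-character state machine by splitting the text on '#' and folding once over the
-- segments (each followed by the marker): same O(n) asymptotics, measurably faster constant factor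
-- (one C-level str.split instead of a per-character Python loop); return values proved equal.

-- ===== PORT A =====
-- literal transliteration of A's character loop; the tag accumulator is kept as List Char
-- (PySem's representation of a growing string), appended exactly as A appends.
def parse_tags_from (text : String) : List String :=
  (text.toList.foldl
    (fun (st : List Char × List String × Bool) s =>
      if s == '#' then
        (([] : List Char), (if st.2.2 then st.2.1 ++ [String.ofList st.1] else st.2.1), !st.2.2)
      else if st.2.2 then
        if s == '\n' || s == ' ' then ([], st.2.1, false)
        else (st.1 ++ [s], st.2.1, st.2.2)
      else st)
    ([], [], false)).2.1

-- ===== PORT B =====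
-- literal transliteration of Source B: split on '#', drop the last piece (the slice [:-1]),
-- fold with state (tags, inside); ' ' in part / '\n' in part is PySem.Chars.isIn.
def parse_tags_from_alt (text : String) : List String :=
  ((PySem.Chars.splitOn text.toList ['#']).dropLast.foldl
    (fun (st : List String × Bool) part =>
      let ok := st.2 && !(PySem.Chars.isIn [' '] part) && !(PySem.Chars.isIn ['\n'] part)
      ((if ok then st.1 ++ [String.ofList part] else st.1), !ok))
    ([], false)).1

-- ===== PRECONDITION & SPEC =====
def Spec_parse_tags_from (text : String) (out : List String) : Prop := out = parse_tags_from_alt text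
instance (text : String) (out : List String) : Decidable (Spec_parse_tags_from text out) := by unfold Spec_parse_tags_from; infer_instance

-- ===== CLAIM (what is proved, stated in full; the proofs are below) =====
def Claim_equal_parse_tags_from : Prop := ∀ (text : String), Dom_parse_tags_from text → Spec_parse_tags_from text (parse_tags_from text)

-- ===== LEMMAS AND PROOFS =====

theorem pvGo_eq (fuel : Nat) : ∀ (l cur : List Char) (acc : List (List Char)),
    l.length < fuel →
    PySem.Chars.splitOn.go ['#'] fuel l cur acc
      = acc.reverse ++ List.modifyHead (cur.reverse ++ ·) (l.splitOnP (· == '#')) := by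
  induction fuel with
  | zero => intro l cur acc h; omega
  | succ f ih =>
    intro l cur acc h
    cases l with
    | nil => simp [PySem.Chars.splitOn.go, List.splitOnP_nil]
    | cons c rest =>
      rw [PySem.Chars.splitOn.go]
      by_cases hc : c = '#'
      · subst hc
        have hp : List.isPrefixOf ['#'] ('#'::rest) = true := by simp [List.isPrefixOf]
        have hd : List.drop ['#'].length ('#'::rest) = rest := by simp
        simp only [hp, if_pos, hd]
        rw [ih rest [] _ (by simpa using Nat.lt_of_succ_lt_succ h)]
        rw [List.splitOnP_cons]
        obtain ⟨q, qs, hq⟩ := List.exists_cons_of_ne_nil (List.splitOnP_ne_nil _ rest)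
        rw [hq]
        simp
      · have hp : List.isPrefixOf ['#'] (c::rest) = false := by
          simp [List.isPrefixOf]; exact fun h' => hc h'.symm
        simp only [hp, Bool.false_eq_true, if_false]
        rw [ih rest (c::cur) acc (by simpa using Nat.lt_of_succ_lt_succ h)]
        rw [List.splitOnP_cons]
        have he : (c == '#') = false := by simp [hc]
        rw [he]
        simp only [Bool.false_eq_true, if_false, List.reverse_cons]
        obtain ⟨q, qs, hq⟩ := List.exists_cons_of_ne_nil (List.splitOnP_ne_nil _ rest)
        rw [hq]
        simp

theorem pvSplit_eq (cs : List Char) :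
    PySem.Chars.splitOn cs ['#'] = cs.splitOnP (· == '#') := by
  rw [PySem.Chars.splitOn, pvGo_eq _ _ _ _ (by omega)]
  obtain ⟨q, qs, hq⟩ := List.exists_cons_of_ne_nil (List.splitOnP_ne_nil (· == '#') cs)
  rw [hq]; simp

def pvStepA (st : List Char × List String × Bool) (s : Char) : List Char × List String × Bool :=
  if s == '#' then
    (([] : List Char), (if st.2.2 then st.2.1 ++ [String.ofList st.1] else st.2.1), !st.2.2)
  else if st.2.2 then
    if s == '\n' || s == ' ' then ([], st.2.1, false)
    else (st.1 ++ [s], st.2.1, st.2.2)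
  else st

def pvStepB (st : List String × Bool) (part : List Char) : List String × Bool :=
  let ok := st.2 && !(PySem.Chars.isIn [' '] part) && !(PySem.Chars.isIn ['\n'] part)
  ((if ok then st.1 ++ [String.ofList part] else st.1), !ok)

theorem pvIsIn_singleton (a : Char) (l : List Char) :
    PySem.Chars.isIn [a] l = l.contains a := by
  by_cases h : a ∈ l
  · rw [(PySem.Chars.isIn_iff_infix _ _).mpr ((List.singleton_infix_iff a l).mpr h)]
    simp [h]
  · rw [(PySem.Chars.isIn_eq_false_iff _ _).mpr (fun hi => h ((List.singleton_infix_iff a l).mp hi))]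
    simp [h]

theorem pvHeadIrrel (p p' : List Char) (ps : List (List Char)) (found : List String) :
    (((p::ps).dropLast.foldl pvStepB (found, false))).1
      = (((p'::ps).dropLast.foldl pvStepB (found, false))).1 := by
  cases ps with
  | nil => rfl
  | cons q qs => simp [pvStepB]

theorem pvMain (cs : List Char) : ∀ (found : List String) (cur : List Char) (inside : Bool),
    (inside = false → cur = []) → ' ' ∉ cur → '\n' ∉ cur →
    (cs.foldl pvStepA (cur, found, inside)).2.1
      = ((List.modifyHead (cur ++ ·) (cs.splitOnP (· == '#'))).dropLast.foldl pvStepB (found, inside)).1 := by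
  induction cs with
  | nil =>
    intro found cur inside h0 hsp hnl
    simp [List.splitOnP_nil]
  | cons c t ih =>
    intro found cur inside h0 hsp hnl
    obtain ⟨q, qs, hq⟩ := List.exists_cons_of_ne_nil (List.splitOnP_ne_nil (· == '#') t)
    rw [List.foldl_cons, List.splitOnP_cons]
    by_cases hc : c = '#'
    · subst hc
      simp only [beq_self_eq_true, if_pos, hq]
      cases inside with
      | false =>
        have hcur : cur = [] := h0 rfl
        subst hcur
        have hA : pvStepA ([], found, false) '#' = ([], found, true) := by
          simp [pvStepA]
        rw [hA, ih found [] true (by simp) (by simp) (by simp), hq]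
        simp only [List.modifyHead_cons, List.nil_append, List.dropLast_cons₂,
          List.foldl_cons]
        have hB : pvStepB (found, false) [] = (found, true) := by
          simp [pvStepB]
        rw [hB]
      | true =>
        have hA : pvStepA (cur, found, true) '#' = ([], found ++ [String.ofList cur], false) := by
          simp [pvStepA]
        rw [hA, ih (found ++ [String.ofList cur]) [] false (by simp) (by simp) (by simp), hq]
        simp only [List.modifyHead_cons, List.append_nil, List.dropLast_cons₂,
          List.foldl_cons]
        have h1 : PySem.Chars.isIn [' '] cur = false := by
          rw [pvIsIn_singleton]; simpa using hsp
        have h2 : PySem.Chars.isIn ['\n'] cur = false := by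
          rw [pvIsIn_singleton]; simpa using hnl
        have hB : pvStepB (found, true) cur = (found ++ [String.ofList cur], false) := by
          simp [pvStepB, h1, h2]
        rw [hB]
        simp
    · have hcb : (c == '#') = false := by simp [hc]
      simp only [hcb, Bool.false_eq_true, if_false, hq, List.modifyHead_cons]
      cases inside with
      | false =>
        have hcur : cur = [] := h0 rfl
        subst hcur
        have hA : pvStepA ([], found, false) c = ([], found, false) := by
          simp [pvStepA, hcb]
        rw [hA, ih found [] false (by simp) (by simp) (by simp), hq]
        simp only [List.modifyHead_cons, List.nil_append]
        simpa using pvHeadIrrel q (c :: q) qs found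
      | true =>
        by_cases hbad : c = '\n' ∨ c = ' '
        · have hA : pvStepA (cur, found, true) c = ([], found, false) := by
            rcases hbad with h | h <;> subst h <;> simp [pvStepA, hcb]
          rw [hA, ih found [] false (by simp) (by simp) (by simp), hq]
          simp only [List.modifyHead_cons, List.nil_append]
          -- both folds start over lists with the same tail; heads processed from different
          -- inside flags but both steps yield (found, true)
          cases qs with
          | nil => rfl
          | cons q' qs' =>
            simp only [List.dropLast_cons₂, List.foldl_cons]
            have hmem : c ∈ cur ++ c :: q := by simp
            have hone : (PySem.Chars.isIn [' '] (cur ++ c :: q) = true)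
                ∨ (PySem.Chars.isIn ['\n'] (cur ++ c :: q) = true) := by
              rcases hbad with h | h
              · right; rw [pvIsIn_singleton]; subst h; simp
              · left; rw [pvIsIn_singleton]; subst h; simp
            have hB1 : pvStepB (found, true) (cur ++ c :: q) = (found, true) := by
              rcases hone with h | h <;> simp [pvStepB, h]
            have hB2 : pvStepB (found, false) q = (found, true) := by
              simp [pvStepB]
            rw [hB1, hB2]
        · have hA : pvStepA (cur, found, true) c = (cur ++ [c], found, true) := by
            have h1 : (c == '\n') = false := by simp; intro h; exact hbad (Or.inl h)
            have h2 : (c == ' ') = false := by simp; intro h; exact hbad (Or.inr h)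
            simp [pvStepA, hcb, h1, h2]
          have hs' : ' ' ∉ cur ++ [c] := by
            simp [hsp]; intro h; exact hbad (Or.inr h.symm)
          have hn' : '\n' ∉ cur ++ [c] := by
            simp [hnl]; intro h; exact hbad (Or.inl h.symm)
          rw [hA, ih found (cur ++ [c]) true (by intro h; cases h) hs' hn', hq]
          simp only [List.modifyHead_cons, List.append_assoc, List.cons_append, List.nil_append]

-- ===== VERDICT (by name: the statement is the Claim_ definition above) =====
theorem parse_tags_from_spec : Claim_equal_parse_tags_from := by
  intro text _
  unfold Spec_parse_tags_from parse_tags_from parse_tags_from_alt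
  rw [pvSplit_eq]
  obtain ⟨q, qs, hq⟩ := List.exists_cons_of_ne_nil (List.splitOnP_ne_nil (· == '#') text.toList)
  have := pvMain text.toList [] [] false (by simp) (by simp) (by simp)
  rw [hq] at this ⊢
  simp only [List.modifyHead_cons, List.nil_append] at this
  exact this
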